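-- pv_equiv track=rewrite | github.com/script-mirror/scripts-unificados | apps/prospec/libs/newave/sistema/sistema.py | identify_blocks
-- ===== SOURCE A (Python) =====
-- def identify_blocks(lines, titles):
--     blocks = {}
--     current_title = None
--     current_content = []
--
--     for line in lines:
--         if any(title in line for title in titles):
--             if current_title and current_content:
--                 blocks[current_title] = current_content
--             current_title = line.strip()
--             current_content = []
--         elif current_title:
--             current_content.append(line.rstrip())
--
--     # Salva o último bloco
--     if current_title and current_content:
--         blocks[current_title] = current_content
--
--     return blocks
-- ===== SOURCE B (Python) =====
-- def identify_blocks(lines, titles):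
--     def is_title(line):
--         return any(t in line for t in titles)
--
--     blocks = {}
--     n = len(lines)
--     # skip lines before the first title
--     i = 0
--     while i < n and not is_title(lines[i]):
--         i += 1
--     # each title line opens a block reaching to the next title line
--     while i < n:
--         j = i + 1
--         while j < n and not is_title(lines[j]):
--             j += 1
--         key = lines[i].strip()
--         content = [l.rstrip() for l in lines[i + 1:j]]
--         if key and content:
--             blocks[key] = content
--         i = j
--     return blocks
-- ===== Notes on version B (the rewrite author's own statement) =====
-- stated objective: alternative
-- what changed: Replaces A's single stateful accumulator pass with a boundary-index scan: B first skips to the first title line, then for each title line takes the slice up to the next title line and assigns the block directly, with no carried title/content state.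
import Mathlib
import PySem

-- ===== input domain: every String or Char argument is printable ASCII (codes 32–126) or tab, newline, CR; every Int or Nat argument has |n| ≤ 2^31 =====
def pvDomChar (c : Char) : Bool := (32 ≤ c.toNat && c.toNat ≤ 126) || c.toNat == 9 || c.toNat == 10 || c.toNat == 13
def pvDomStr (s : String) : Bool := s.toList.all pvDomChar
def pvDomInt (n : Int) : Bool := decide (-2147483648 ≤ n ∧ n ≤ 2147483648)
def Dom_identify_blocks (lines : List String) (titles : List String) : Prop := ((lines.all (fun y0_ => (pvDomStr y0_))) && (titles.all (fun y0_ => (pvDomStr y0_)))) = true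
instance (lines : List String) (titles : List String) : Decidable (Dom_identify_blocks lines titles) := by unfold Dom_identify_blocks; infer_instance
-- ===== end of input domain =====

-- B groups lines by boundary scanning (slice between consecutive title lines) instead of A's
-- stateful single pass; same dict of blocks, return-value equivalence proved below.

-- ===== PORT A =====
-- `any(title in line for title in titles)`
def pvIsTitle (titles : List String) (line : String) : Bool :=
  titles.any (fun t => PySem.Str.isIn t line)

-- `if current_title and current_content: blocks[current_title] = current_content`
-- (current_title is None or a string; Python truthiness: None and "" are falsy)
def pvASave (b : PySem.Dict String (List String)) (t : Option String) (c : List String) :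
    PySem.Dict String (List String) :=
  match t with
  | none => b
  | some s => if s ≠ "" ∧ c ≠ [] then b.insert s c else b

-- the `for line in lines` loop, then the final save
def pvALoop (titles : List String) (b : PySem.Dict String (List String))
    (t : Option String) (c : List String) : List String → PySem.Dict String (List String)
  | [] => pvASave b t c
  | l :: ls =>
    if pvIsTitle titles l then
      pvALoop titles (pvASave b t c) (some (PySem.Str.strip l)) [] ls
    else if (match t with | none => false | some s => decide (s ≠ "")) then
      pvALoop titles b t (c ++ [PySem.Str.rstrip l]) ls
    else
      pvALoop titles b t c ls

def identify_blocks (lines : List String) (titles : List String) : List (String × List String) :=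
  (pvALoop titles PySem.Dict.empty none [] lines).items

-- ===== PORT B =====
-- outer while loop of Source B: each title line opens a block up to the next title line
-- (the inner `while j < n and not is_title` is the span/takeWhile–dropWhile of the tail)
def pvBGroups (titles : List String) : List String → List (String × List String)
  | [] => []
  | l :: ls =>
    (PySem.Str.strip l, (ls.takeWhile (fun x => !pvIsTitle titles x)).map PySem.Str.rstrip)
      :: pvBGroups titles (ls.dropWhile (fun x => !pvIsTitle titles x))
termination_by ls => ls.length
decreasing_by
  have := List.length_dropWhile_le (fun x => !pvIsTitle titles x) ls
  simp only [List.length_cons]; omega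

-- `if key and content: blocks[key] = content`
def pvBInsert (b : PySem.Dict String (List String)) (g : String × List String) :
    PySem.Dict String (List String) :=
  if g.1 ≠ "" ∧ g.2 ≠ [] then b.insert g.1 g.2 else b

def identify_blocks_alt (lines : List String) (titles : List String) : List (String × List String) :=
  ((pvBGroups titles (lines.dropWhile (fun l => !pvIsTitle titles l))).foldl
      pvBInsert PySem.Dict.empty).items

-- ===== PRECONDITION & SPEC =====
def Spec_identify_blocks (lines : List String) (titles : List String) (out : List (String × List String)) : Prop := out = identify_blocks_alt lines titles
instance (lines : List String) (titles : List String) (out : List (String × List String)) : Decidable (Spec_identify_blocks lines titles out) := by unfold Spec_identify_blocks; infer_instance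

-- ===== CLAIM (what is proved, stated in full; the proofs are below) =====
def Claim_equal_identify_blocks : Prop := ∀ (lines : List String) (titles : List String), Dom_identify_blocks lines titles → Spec_identify_blocks lines titles (identify_blocks lines titles)

-- ===== LEMMAS AND PROOFS =====

-- the pending block of A's loop state, as the group list B would prepend
def pvHead (t : Option String) (c : List String) (titles : List String) (rest : List String) :
    List (String × List String) :=
  if t.getD "" ≠ "" then
    [(t.getD "", c ++ (rest.takeWhile (fun x => !pvIsTitle titles x)).map PySem.Str.rstrip)]
  else []

lemma pvFoldl_head (b : PySem.Dict String (List String)) (t : Option String) (c : List String)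
    (titles rest : List String) :
    (pvHead t c titles rest).foldl pvBInsert b = pvASave b t (c ++ (rest.takeWhile (fun x => !pvIsTitle titles x)).map PySem.Str.rstrip) := by
  cases t with
  | none => simp [pvHead, pvASave]
  | some s =>
    by_cases hs : s = "" <;> simp [pvHead, pvASave, pvBInsert, hs]

lemma pvBGroups_cons (titles : List String) (l : String) (ls : List String) :
    pvBGroups titles (l :: ls) =
      (PySem.Str.strip l, (ls.takeWhile (fun x => !pvIsTitle titles x)).map PySem.Str.rstrip)
        :: pvBGroups titles (ls.dropWhile (fun x => !pvIsTitle titles x)) := by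
  rw [pvBGroups.eq_def]

lemma pvLoop_eq (titles : List String) (rest : List String) :
    ∀ (b : PySem.Dict String (List String)) (t : Option String) (c : List String),
    pvALoop titles b t c rest =
      (pvHead t c titles rest ++
        pvBGroups titles (rest.dropWhile (fun x => !pvIsTitle titles x))).foldl pvBInsert b := by
  induction rest with
  | nil =>
    intro b t c
    simp [pvALoop, pvBGroups, pvFoldl_head]
  | cons l ls ih =>
    intro b t c
    by_cases ht : pvIsTitle titles l = true
    · have hnt : (!pvIsTitle titles l) = false := by simp [ht]
      rw [List.foldl_append, pvFoldl_head]
      simp only [pvALoop, ht, ih, List.takeWhile_cons, List.dropWhile_cons, Bool.not_true,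
        Bool.false_eq_true, if_false, if_true, List.map_nil, List.append_nil]
      rw [List.foldl_append, pvFoldl_head, pvBGroups_cons, List.foldl_cons]
      congr 1
    · have ht' : pvIsTitle titles l = false := by simpa using ht
      have hnt : (!pvIsTitle titles l) = true := by simp [ht']
      have hkey : (match t with | none => false | some s => decide (s ≠ "")) =
          decide (t.getD "" ≠ "") := by cases t <;> simp
      simp only [pvALoop, ht', Bool.false_eq_true, if_false, hkey]
      by_cases hk : t.getD "" ≠ ""
      · rw [if_pos (by simpa using hk), ih]
        simp [hnt, pvHead, hk]
      · rw [if_neg (by simpa using hk), ih]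
        simp [hnt, pvHead, hk]

-- ===== VERDICT (by name: the statement is the Claim_ definition above) =====
theorem identify_blocks_spec : Claim_equal_identify_blocks := by
  intro lines titles _
  show identify_blocks lines titles = identify_blocks_alt lines titles
  unfold identify_blocks identify_blocks_alt
  rw [pvLoop_eq]
  simp [pvHead]
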